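-- pv_equiv track=rewrite | github.com/martisala07/hpp-load-planner | app.py | units_last_container_last_cycle
-- ===== SOURCE A (Python) =====
-- import math
--
-- def units_last_container_last_cycle(N, k_petit, k_gran, cap_petit, cap_gran):
--     """
--     Supòsit:
--     - A cada cicle omples contenidors en aquest ordre: primer GRANS, després PETITS.
--     - Retorna quantes unitats té l'últim contenidor de l'últim cicle.
--     """
--     caps = ([int(cap_gran)] * int(k_gran)) + ([int(cap_petit)] * int(k_petit))
--     if not caps:
--         return 0, 0, 0
--
--     units_per_cycle = int(k_petit) * int(cap_petit) + int(k_gran) * int(cap_gran)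
--     if units_per_cycle <= 0:
--         return 0, caps[-1], 10**9
--
--     cycles = int(math.ceil(int(N) / units_per_cycle))
--     rem = int(int(N) - (cycles - 1) * units_per_cycle)
--
--     if rem == 0:
--         return int(caps[-1]), int(caps[-1]), cycles
--
--     for cap in caps:
--         if rem > cap:
--             rem -= cap
--         else:
--             return int(rem), int(cap), cycles
--
--     return int(caps[-1]), int(caps[-1]), cycles
-- ===== SOURCE B (Python) =====
-- def _phase(rem, k, cap):
--     """Pass rem through k containers of capacity cap in O(1).
--     Returns (hit, new_rem): hit = (units, cap) for the first container
--     that absorbs the remainder, or None if all k are filled completely."""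
--     if k <= 0:
--         return None, rem
--     if rem <= cap:
--         return (rem, cap), rem
--     if cap > 0:
--         i = -(-rem // cap) - 1  # first index with rem - i*cap <= cap
--         if i < k:
--             return (rem - i * cap, cap), rem
--     return None, rem - k * cap
--
--
-- def units_last_container_last_cycle(N, k_petit, k_gran, cap_petit, cap_gran):
--     N, kp, kg = int(N), int(k_petit), int(k_gran)
--     cp, cg = int(cap_petit), int(cap_gran)
--     if kp <= 0 and kg <= 0:
--         return 0, 0, 0
--     last = cp if kp > 0 else cg
--     u = kp * cp + kg * cg
--     if u <= 0:
--         return 0, last, 10 ** 9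
--     cycles = -(-N // u)
--     rem = N - (cycles - 1) * u
--     if rem == 0:
--         return last, last, cycles
--     hit, rem = _phase(rem, kg, cg)
--     if hit is None:
--         hit, rem = _phase(rem, kp, cp)
--     if hit is None:
--         return last, last, cycles
--     return hit[0], hit[1], cycles
-- ===== Notes on version B (the rewrite author's own statement) =====
-- stated objective: faster
-- what changed: B replaces A's materialised per-container capacity list and linear scan with O(1) ceiling-division arithmetic over the two homogeneous capacity blocks.
import Mathlib
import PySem

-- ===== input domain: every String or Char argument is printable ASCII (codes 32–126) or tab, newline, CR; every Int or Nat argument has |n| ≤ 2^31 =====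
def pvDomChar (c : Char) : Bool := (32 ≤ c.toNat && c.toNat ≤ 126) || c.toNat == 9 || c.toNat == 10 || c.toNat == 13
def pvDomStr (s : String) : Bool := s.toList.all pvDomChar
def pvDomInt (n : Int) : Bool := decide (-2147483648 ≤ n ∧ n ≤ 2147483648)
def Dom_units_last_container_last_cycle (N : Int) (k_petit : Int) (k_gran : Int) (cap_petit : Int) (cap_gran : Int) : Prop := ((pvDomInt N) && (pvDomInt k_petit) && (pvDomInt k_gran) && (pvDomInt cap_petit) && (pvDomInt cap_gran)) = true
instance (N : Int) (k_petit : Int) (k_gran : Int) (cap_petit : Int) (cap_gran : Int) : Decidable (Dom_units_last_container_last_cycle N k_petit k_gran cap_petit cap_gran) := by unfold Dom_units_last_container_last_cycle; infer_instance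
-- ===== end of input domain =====

-- B replaces A's materialised per-container list and linear scan by O(1) ceiling-division arithmetic over the two capacity blocks.


-- ===== PORT A =====
-- the 'for cap in caps' loop: subtract caps until one absorbs rem; some (rem, cap) at the
-- early return, none at fall-through
def ulccGoA : List Int → Int → Option (Int × Int)
  | [], _ => none
  | c :: t, rem => if rem > c then ulccGoA t (rem - c) else some (rem, c)

-- '[cap]*k' with k ≤ 0 is [] in Python, hence .toNat.
-- 'math.ceil(N / units_per_cycle)' uses float division; for |N| ≤ 2^31 (our Dom) the float
-- result rounds to an integer only when the exact quotient is within 2^-21 of it, which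
-- cannot cross an integer, so it is ported exactly as the integer ceiling -((-N).fdiv u).
-- 'caps[-1]' on the (there nonempty) caps list is ported as getLastD 0.
def units_last_container_last_cycle (N : Int) (k_petit : Int) (k_gran : Int) (cap_petit : Int) (cap_gran : Int) : List Int :=
  let caps : List Int := List.replicate k_gran.toNat cap_gran ++ List.replicate k_petit.toNat cap_petit
  if caps = [] then [0, 0, 0]
  else
    let units_per_cycle := k_petit * cap_petit + k_gran * cap_gran
    if units_per_cycle ≤ 0 then [0, caps.getLastD 0, 10 ^ 9]
    else
      let cycles := -((-N).fdiv units_per_cycle)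
      let rem := N - (cycles - 1) * units_per_cycle
      if rem = 0 then [caps.getLastD 0, caps.getLastD 0, cycles]
      else
        match ulccGoA caps rem with
        | some (r, c) => [r, c, cycles]
        | none => [caps.getLastD 0, caps.getLastD 0, cycles]

-- ===== PORT B =====
-- Source B's _phase: pass rem through k containers of capacity cap in O(1)
def ulccPhase (rem k cap : Int) : Option (Int × Int) × Int :=
  if k ≤ 0 then (none, rem)
  else if rem ≤ cap then (some (rem, cap), rem)
  else if 0 < cap then
    let i := -((-rem).fdiv cap) - 1
    if i < k then (some (rem - i * cap, cap), rem) else (none, rem - k * cap)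
  else (none, rem - k * cap)

def units_last_container_last_cycle_alt (N : Int) (k_petit : Int) (k_gran : Int) (cap_petit : Int) (cap_gran : Int) : List Int :=
  if k_petit ≤ 0 ∧ k_gran ≤ 0 then [0, 0, 0]
  else
    let last := if 0 < k_petit then cap_petit else cap_gran
    let u := k_petit * cap_petit + k_gran * cap_gran
    if u ≤ 0 then [0, last, 10 ^ 9]
    else
      let cycles := -((-N).fdiv u)
      let rem := N - (cycles - 1) * u
      if rem = 0 then [last, last, cycles]
      else
        match ulccPhase rem k_gran cap_gran with
        | (some (r, c), _) => [r, c, cycles]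
        | (none, rem2) =>
          match ulccPhase rem2 k_petit cap_petit with
          | (some (r, c), _) => [r, c, cycles]
          | (none, _) => [last, last, cycles]

-- ===== PRECONDITION & SPEC =====
def Spec_units_last_container_last_cycle (N : Int) (k_petit : Int) (k_gran : Int) (cap_petit : Int) (cap_gran : Int) (out : List Int) : Prop := out = units_last_container_last_cycle_alt N k_petit k_gran cap_petit cap_gran
instance (N : Int) (k_petit : Int) (k_gran : Int) (cap_petit : Int) (cap_gran : Int) (out : List Int) : Decidable (Spec_units_last_container_last_cycle N k_petit k_gran cap_petit cap_gran out) := by unfold Spec_units_last_container_last_cycle; infer_instance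

-- ===== CLAIM (what is proved, stated in full; the proofs are below) =====
def Claim_equal_units_last_container_last_cycle : Prop := ∀ (N : Int) (k_petit : Int) (k_gran : Int) (cap_petit : Int) (cap_gran : Int), Dom_units_last_container_last_cycle N k_petit k_gran cap_petit cap_gran → Spec_units_last_container_last_cycle N k_petit k_gran cap_petit cap_gran (units_last_container_last_cycle N k_petit k_gran cap_petit cap_gran)

-- ===== LEMMAS AND PROOFS =====

-- ceiling bracketing: q := -((-rem).fdiv c) is the ceiling of rem/c: c*q - c < rem <= c*q
lemma ulccCeil_bounds (c rem : Int) (hc : 0 < c) :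
    c * (-((-rem).fdiv c)) - c < rem ∧ rem ≤ c * (-((-rem).fdiv c)) := by
  have he : (-rem).fdiv c = (-rem) / c := by rw [Int.fdiv_eq_ediv]; simp [Or.inl hc.le]
  have h1 := Int.mul_ediv_add_emod (-rem) c
  have h2 : 0 ≤ (-rem) % c := Int.emod_nonneg _ (by omega)
  have h3 : (-rem) % c < c := Int.emod_lt_of_pos _ hc
  rw [he]
  constructor <;> nlinarith [h1, h2, h3]

-- ceil(rem/c) = ceil((rem-c)/c) + 1 for positive c
lemma ulccCeil_succ (c rem : Int) (hc : 0 < c) :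
    -((-rem).fdiv c) = -((-(rem - c)).fdiv c) + 1 := by
  obtain ⟨a1, a2⟩ := ulccCeil_bounds c rem hc
  obtain ⟨b1, b2⟩ := ulccCeil_bounds c (rem - c) hc
  have h1 : c * (-((-rem).fdiv c)) < c * (-((-(rem - c)).fdiv c) + 2) := by nlinarith
  have h2 : c * (-((-(rem - c)).fdiv c)) < c * (-((-rem).fdiv c)) := by nlinarith
  have g1 := lt_of_mul_lt_mul_left h1 hc.le
  have g2 := lt_of_mul_lt_mul_left h2 hc.le
  omega

-- A's loop over one replicate block is B's closed-form phase, then the rest of the list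
lemma ulccGoA_replicate (k : Nat) (c : Int) (rest : List Int) (rem : Int) :
    ulccGoA (List.replicate k c ++ rest) rem =
      (match ulccPhase rem (k : Int) c with
       | (some p, _) => some p
       | (none, rem') => ulccGoA rest rem') := by
  induction k generalizing rem with
  | zero => simp [ulccPhase]
  | succ n ih =>
    rw [List.replicate_succ, List.cons_append]
    simp only [ulccGoA]
    have hcast : ((n + 1 : Nat) : Int) = (n : Int) + 1 := by push_cast; ring
    rw [hcast]
    by_cases hrc : rem > c
    · rw [if_pos hrc, ih]
      by_cases hc : 0 < c
      · have hq := ulccCeil_succ c rem hc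
        obtain ⟨qa, qb⟩ := ulccCeil_bounds c rem hc
        obtain ⟨pa, pb⟩ := ulccCeil_bounds c (rem - c) hc
        by_cases hn : (n : Int) ≤ 0
        · have hn0 : (n : Int) = 0 := by omega
          have hq1 : (1 : Int) < -((-rem).fdiv c) := by
            have l1 : c * 1 < c * (-((-rem).fdiv c)) := by rw [mul_one]; omega
            exact lt_of_mul_lt_mul_left l1 hc.le
          have e1 : ulccPhase rem ((n : Int) + 1) c = (none, rem - ((n : Int) + 1) * c) := by
            unfold ulccPhase
            rw [if_neg (by omega), if_neg (by omega), if_pos hc, if_neg (by omega)]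
          have e2 : ulccPhase (rem - c) ((n : Int)) c = (none, rem - c) := by
            unfold ulccPhase; rw [if_pos hn]
          rw [e1, e2]
          have : rem - ((n : Int) + 1) * c = rem - c := by rw [hn0]; ring
          rw [this]
        · by_cases h2 : rem - c ≤ c
          · have l1 : c * (-((-(rem - c)).fdiv c)) < c * 2 := by omega
            have l2 : c * 0 < c * (-((-(rem - c)).fdiv c)) := by omega
            have g1 := lt_of_mul_lt_mul_left l1 hc.le
            have g2 := lt_of_mul_lt_mul_left l2 hc.le
            have hq1 : -((-(rem - c)).fdiv c) = 1 := by omega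
            have e1 : ulccPhase rem ((n : Int) + 1) c
                = (some (rem - (-((-rem).fdiv c) - 1) * c, c), rem) := by
              unfold ulccPhase
              rw [if_neg (by omega), if_neg (by omega), if_pos hc, if_pos (by omega)]
            have e2 : ulccPhase (rem - c) ((n : Int)) c = (some (rem - c, c), rem - c) := by
              unfold ulccPhase; rw [if_neg hn, if_pos h2]
            rw [e1, e2]
            have : rem - (-((-rem).fdiv c) - 1) * c = rem - c := by rw [hq, hq1]; ring
            rw [this]
          · by_cases h3 : -((-(rem - c)).fdiv c) - 1 < (n : Int)
            · have e1 : ulccPhase rem ((n : Int) + 1) c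
                  = (some (rem - (-((-rem).fdiv c) - 1) * c, c), rem) := by
                unfold ulccPhase
                rw [if_neg (by omega), if_neg (by omega), if_pos hc, if_pos (by omega)]
              have e2 : ulccPhase (rem - c) ((n : Int)) c
                  = (some (rem - c - (-((-(rem - c)).fdiv c) - 1) * c, c), rem - c) := by
                unfold ulccPhase
                rw [if_neg hn, if_neg h2, if_pos hc, if_pos h3]
              rw [e1, e2]
              have : rem - (-((-rem).fdiv c) - 1) * c
                  = rem - c - (-((-(rem - c)).fdiv c) - 1) * c := by rw [hq]; ring
              rw [this]
            · have e1 : ulccPhase rem ((n : Int) + 1) c = (none, rem - ((n : Int) + 1) * c) := by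
                unfold ulccPhase
                rw [if_neg (by omega), if_neg (by omega), if_pos hc, if_neg (by omega)]
              have e2 : ulccPhase (rem - c) ((n : Int)) c = (none, rem - c - (n : Int) * c) := by
                unfold ulccPhase
                rw [if_neg hn, if_neg h2, if_pos hc, if_neg h3]
              rw [e1, e2]
              have : rem - ((n : Int) + 1) * c = rem - c - (n : Int) * c := by ring
              rw [this]
      · replace hc : c ≤ 0 := by omega
        by_cases hn : (n : Int) ≤ 0
        · have hn0 : (n : Int) = 0 := by omega
          have e1 : ulccPhase rem ((n : Int) + 1) c = (none, rem - ((n : Int) + 1) * c) := by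
            unfold ulccPhase
            rw [if_neg (by omega), if_neg (by omega), if_neg (by omega)]
          have e2 : ulccPhase (rem - c) ((n : Int)) c = (none, rem - c) := by
            unfold ulccPhase; rw [if_pos hn]
          rw [e1, e2]
          have : rem - ((n : Int) + 1) * c = rem - c := by rw [hn0]; ring
          rw [this]
        · have e1 : ulccPhase rem ((n : Int) + 1) c = (none, rem - ((n : Int) + 1) * c) := by
            unfold ulccPhase
            rw [if_neg (by omega), if_neg (by omega), if_neg (by omega)]
          have e2 : ulccPhase (rem - c) ((n : Int)) c = (none, rem - c - (n : Int) * c) := by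
            unfold ulccPhase
            rw [if_neg hn, if_neg (by omega), if_neg (by omega)]
          rw [e1, e2]
          have : rem - ((n : Int) + 1) * c = rem - c - (n : Int) * c := by ring
          rw [this]
    · rw [if_neg hrc]
      unfold ulccPhase
      rw [if_neg (by omega), if_pos (by omega)]

-- phase ignores the difference between k and max k 0
lemma ulccPhase_toNat (rem k c : Int) : ulccPhase rem ((k.toNat : Nat) : Int) c = ulccPhase rem k c := by
  by_cases hk : k ≤ 0
  · unfold ulccPhase
    rw [if_pos (by omega), if_pos hk]
  · rw [Int.toNat_of_nonneg (by omega)]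

-- last element of the two-block caps list
lemma ulccGetLastD_rep (a b : Nat) (x y d : Int) (h : ¬(a = 0 ∧ b = 0)) :
    (List.replicate a x ++ List.replicate b y).getLastD d = if 0 < b then y else x := by
  rw [List.getLastD_eq_getLast?]
  rcases Nat.eq_zero_or_pos b with hb | hb
  · subst hb
    obtain ⟨m, rfl⟩ := Nat.exists_eq_succ_of_ne_zero (by omega : a ≠ 0)
    rw [if_neg (by omega)]
    rw [List.replicate_zero, List.append_nil, List.replicate_succ', List.getLast?_concat]
    rfl
  · obtain ⟨m, rfl⟩ := Nat.exists_eq_succ_of_ne_zero (by omega : b ≠ 0)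
    rw [if_pos hb]
    rw [List.replicate_succ', ← List.append_assoc, List.getLast?_concat]
    rfl

-- ===== VERDICT (by name: the statement is the Claim_ definition above) =====
theorem units_last_container_last_cycle_spec : Claim_equal_units_last_container_last_cycle := by
  intro N kp kg cp cg _
  unfold Spec_units_last_container_last_cycle
  unfold units_last_container_last_cycle units_last_container_last_cycle_alt
  by_cases hempty : (List.replicate kg.toNat cg ++ List.replicate kp.toNat cp : List Int) = []
  · have hk : kp ≤ 0 ∧ kg ≤ 0 := by
      simp [List.append_eq_nil_iff, List.replicate_eq_nil_iff] at hempty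
      omega
    rw [if_pos hempty, if_pos hk]
  · have hk : ¬(kp ≤ 0 ∧ kg ≤ 0) := by
      intro ⟨h1, h2⟩
      apply hempty
      simp [List.replicate_eq_nil_iff]
      omega
    rw [if_neg hempty, if_neg hk]
    have hlenk : ¬(kg.toNat = 0 ∧ kp.toNat = 0) := by
      intro ⟨h1, h2⟩
      apply hempty
      simp [h1, h2]
    have hlast : (List.replicate kg.toNat cg ++ List.replicate kp.toNat cp : List Int).getLastD 0
        = if 0 < kp then cp else cg := by
      rw [ulccGetLastD_rep _ _ _ _ _ hlenk]
      by_cases hp : 0 < kp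
      · rw [if_pos (by omega), if_pos hp]
      · rw [if_neg (by omega), if_neg hp]
    rw [hlast]
    by_cases hu : kp * cp + kg * cg ≤ 0
    · rw [if_pos hu, if_pos hu]
    · rw [if_neg hu, if_neg hu]
      by_cases hrem : N - (-((-N).fdiv (kp * cp + kg * cg)) - 1) * (kp * cp + kg * cg) = 0
      · rw [if_pos hrem, if_pos hrem]
      · rw [if_neg hrem, if_neg hrem]
        rw [ulccGoA_replicate, ulccPhase_toNat]
        cases h1 : ulccPhase (N - (-((-N).fdiv (kp * cp + kg * cg)) - 1) * (kp * cp + kg * cg)) kg cg with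
        | mk o1 r1 =>
          cases o1 with
          | some p => rfl
          | none =>
            dsimp only
            rw [show (List.replicate kp.toNat cp : List Int) = List.replicate kp.toNat cp ++ []
                  from (List.append_nil _).symm,
                ulccGoA_replicate, ulccPhase_toNat]
            cases h2 : ulccPhase r1 kp cp with
            | mk o2 r2 =>
              cases o2 with
              | some q => rfl
              | none => rfl
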